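-- pv_equiv track=rewrite | github.com/prach6i/retrieval25 | code/train_final.py | get_image_dict
-- ===== SOURCE A (Python) =====
-- def get_image_dict(X,words):
-- 	unique_words=[]
-- 	dic={}
-- 	for i in range(len(words)):
-- 		if words[i] not in unique_words:
-- 			arr=[]
-- 			unique_words.append(words[i])
-- 			for j in X[i]:
-- 				arr.append(j)
-- 			dic[words[i]]=arr
-- 	return dic
-- ===== SOURCE B (Python) =====
-- def get_image_dict(X, words):
--     first = {}
--     for i in reversed(range(len(words))):
--         first[words[i]] = i
--     return {w: list(X[i]) for w, i in sorted(first.items(), key=lambda p: p[1])}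
-- ===== Notes on version B (the rewrite author's own statement) =====
-- stated objective: alternative
-- what changed: Instead of a forward scan with a membership test and conditional insert, B scans the indices in reverse with an unconditional dict overwrite (the last write per word is its first index) and then sorts the table by index to restore first-occurrence key order; no 'seen' structure or conditional exists.
import Mathlib
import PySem

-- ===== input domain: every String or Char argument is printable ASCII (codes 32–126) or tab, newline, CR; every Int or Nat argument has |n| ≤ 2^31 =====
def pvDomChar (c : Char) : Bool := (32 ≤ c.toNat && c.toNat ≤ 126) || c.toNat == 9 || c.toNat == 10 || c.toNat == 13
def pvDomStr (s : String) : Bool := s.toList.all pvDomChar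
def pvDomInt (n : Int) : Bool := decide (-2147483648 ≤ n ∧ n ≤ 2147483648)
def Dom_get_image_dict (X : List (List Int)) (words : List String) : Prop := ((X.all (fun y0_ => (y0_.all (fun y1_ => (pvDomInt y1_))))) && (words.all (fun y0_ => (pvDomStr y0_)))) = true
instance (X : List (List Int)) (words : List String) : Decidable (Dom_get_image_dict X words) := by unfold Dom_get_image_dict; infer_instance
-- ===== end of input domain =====

-- B replaces A's forward scan with membership test by a reverse scan with unconditional dict
-- overwrite (last write per word = its first index) followed by a sort of the table by index,
-- which restores first-occurrence key order (alternative decomposition, similar cost).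

-- ===== PORT A =====
def get_image_dict (X : List (List Int)) (words : List String) : List (String × List Int) :=
  ((PySem.List.pyRange 0 (PySem.List.len words) 1).foldl
    (fun (st : List String × PySem.Dict String (List Int)) i =>
      if (PySem.List.pyGetD words i "") ∈ st.1 then st
      else
        (st.1 ++ [PySem.List.pyGetD words i ""],
         st.2.insert (PySem.List.pyGetD words i "")
           ((PySem.List.pyGetD X i []).foldl (fun arr j => arr ++ [j]) [])))
    ([], PySem.Dict.empty)).2.items

-- ===== PORT B =====
def get_image_dict_alt (X : List (List Int)) (words : List String) : List (String × List Int) :=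
  let first : PySem.Dict String Int :=
    ((PySem.List.pyRange 0 (PySem.List.len words) 1).reverse).foldl
      (fun d i => d.insert (PySem.List.pyGetD words i "") i) PySem.Dict.empty
  (PySem.List.sorted first.items (fun p => p.2)).map
    (fun p => (p.1, PySem.List.pyGetD X p.2 []))

-- ===== PRECONDITION & SPEC =====
-- Pre_: for every first occurrence of a word at position i, X has an i-th row
-- (otherwise both Pythons raise IndexError at X[i]).
def Pre_get_image_dict (X : List (List Int)) (words : List String) : Prop :=
  ∀ i : Fin words.length, words[i] ∉ words.take i.1 → i.1 < X.length
instance (X : List (List Int)) (words : List String) : Decidable (Pre_get_image_dict X words) := by unfold Pre_get_image_dict; infer_instance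
def pvWitness_get_image_dict : List (List Int) × List String := ([[1, 2], [3]], ["a", "b", "a"])

def Spec_get_image_dict (X : List (List Int)) (words : List String) (out : List (String × List Int)) : Prop := out = get_image_dict_alt X words
instance (X : List (List Int)) (words : List String) (out : List (String × List Int)) : Decidable (Spec_get_image_dict X words out) := by unfold Spec_get_image_dict; infer_instance

-- ===== CLAIM (what is proved, stated in full; the proofs are below) =====
def Claim_equal_get_image_dict : Prop := ∀ (X : List (List Int)) (words : List String), Dom_get_image_dict X words → Pre_get_image_dict X words → Spec_get_image_dict X words (get_image_dict X words)

-- ===== LEMMAS AND PROOFS =====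

-- the indices of first occurrences among the first k words, in increasing order
def pvFk (words : List String) (k : Nat) : List Nat :=
  (List.range k).filter (fun i => decide (words.getD i "" ∉ words.take i))

-- the common value of both programs
def pvL (X : List (List Int)) (words : List String) : List (String × List Int) :=
  (pvFk words words.length).map (fun i => (words.getD i "", PySem.List.pyGetD X (i : Int) []))

-- idxOf at a first occurrence
theorem pv_idxOf_getElem (l : List String) : ∀ (k : Nat) (hk : k < l.length),
    l[k] ∉ l.take k → l.idxOf l[k] = k := by
  induction l with
  | nil => intro k hk; simp at hk
  | cons x xs ih =>
    intro k hk h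
    cases k with
    | zero => simp [List.idxOf_cons_self]
    | succ j =>
      have hj : j < xs.length := by simpa using hk
      simp only [List.take_succ_cons, List.mem_cons, not_or] at h
      have hx : (x :: xs)[j + 1] = xs[j] := by simp
      rw [hx] at h ⊢
      have hne : x ≠ xs[j] := fun he => h.1 he.symm
      rw [List.idxOf_cons]
      simp only [beq_eq_false_iff_ne.mpr hne, cond_false]
      rw [ih j hj h.2]

-- an element never occurs before its idxOf
theorem pv_not_mem_take_idxOf (l : List String) (x : String) : x ∉ l.take (l.idxOf x) := by
  induction l with
  | nil => simp
  | cons y ys ih =>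
    rw [List.idxOf_cons]
    by_cases h : y = x
    · simp [h, cond_true]
    · simp only [beq_eq_false_iff_ne.mpr h, cond_false, List.take_succ_cons, List.mem_cons,
        not_or]
      exact ⟨fun he => h he.symm, ih⟩

-- one step of the first-occurrence index list
theorem pvFk_succ (words : List String) (k : Nat) :
    pvFk words (k + 1)
      = pvFk words k ++ (if words.getD k "" ∉ words.take k then [k] else []) := by
  rw [pvFk, pvFk, List.range_succ, List.filter_append]
  congr 1
  by_cases h : words.getD k "" ∉ words.take k <;> simp [List.filter_cons]

-- membership in the first-occurrence words of a prefix
theorem pvFk_mem (words : List String) : ∀ (k : Nat), k ≤ words.length → ∀ (w : String),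
    (w ∈ (pvFk words k).map (fun i => words.getD i "")) ↔ w ∈ words.take k := by
  intro k
  induction k with
  | zero => intro _ w; simp [pvFk]
  | succ k ih =>
    intro hk w
    have hk' : k ≤ words.length := Nat.le_of_succ_le hk
    have hklt : k < words.length := hk
    have hg : words.getD k "" = words[k] := List.getD_eq_getElem words "" hklt
    have htake : words.take (k + 1) = words.take k ++ [words[k]] := by
      rw [List.take_add_one, List.getElem?_eq_getElem hklt]; rfl
    rw [pvFk_succ, List.map_append, htake]
    by_cases hnew : words.getD k "" ∉ words.take k
    · rw [if_pos hnew]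
      simp only [List.map_cons, List.map_nil, List.mem_append, List.mem_singleton]
      rw [ih hk', hg]
    · rw [if_neg hnew]
      rw [Decidable.not_not] at hnew
      simp only [List.map_nil, List.append_nil, List.mem_append, List.mem_singleton]
      rw [ih hk']
      constructor
      · exact Or.inl
      · rintro (h | h)
        · exact h
        · rw [h, ← hg]; exact hnew

-- A's loop over the first k indices, characterised
theorem pvA_loop (X : List (List Int)) (words : List String) : ∀ (k : Nat), k ≤ words.length →
    (List.foldl
      (fun (st : List String × PySem.Dict String (List Int)) (i : Nat) =>
        if words.getD i "" ∈ st.1 then st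
        else (st.1 ++ [words.getD i ""],
              st.2.insert (words.getD i "") (PySem.List.pyGetD X (i : Int) [])))
      ([], PySem.Dict.empty) (List.range k))
    = ((pvFk words k).map (fun i => words.getD i ""),
       PySem.Dict.mk ((pvFk words k).map (fun i => (words.getD i "", PySem.List.pyGetD X (i : Int) [])))) := by
  intro k
  induction k with
  | zero => intro _; rfl
  | succ k ih =>
    intro hk
    have hk' : k ≤ words.length := Nat.le_of_succ_le hk
    rw [List.range_succ, List.foldl_append, ih hk', List.foldl_cons, List.foldl_nil,
      pvFk_succ]
    by_cases hnew : words.getD k "" ∉ words.take k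
    · have hmem : words.getD k "" ∉ (pvFk words k).map (fun i => words.getD i "") := by
        rw [pvFk_mem words k hk']; exact hnew
      have hcon : (PySem.Dict.mk ((pvFk words k).map
          (fun i => (words.getD i "", PySem.List.pyGetD X (i : Int) [])))).contains
          (words.getD k "") = false := by
        rw [← Bool.not_eq_true, PySem.Dict.contains_iff_mem_keys]
        simp only [PySem.Dict.keys_mk, List.map_map]
        intro h
        exact hmem (by simpa [Function.comp] using h)
      rw [if_neg hmem, if_pos hnew]
      refine Prod.ext ?_ ?_
      · simp only [List.map_append, List.map_cons, List.map_nil]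
      · apply PySem.Dict.ext
        rw [PySem.Dict.items_insert_of_not_contains _ _ hcon]
        simp [List.map_append]
    · have hmem : words.getD k "" ∈ (pvFk words k).map (fun i => words.getD i "") := by
        rw [pvFk_mem words k hk']
        exact Decidable.not_not.mp hnew
      rw [if_pos hmem, if_neg hnew, List.append_nil]

-- A computes pvL
theorem pvA_eq (X : List (List Int)) (words : List String) :
    get_image_dict X words = pvL X words := by
  unfold get_image_dict
  rw [PySem.List.len_eq, PySem.List.pyRange_zero_nat, List.foldl_map]
  have hfun : (fun (st : List String × PySem.Dict String (List Int)) (k : Nat) =>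
      if (PySem.List.pyGetD words (↑k) "") ∈ st.1 then st
      else (st.1 ++ [PySem.List.pyGetD words (↑k) ""],
            st.2.insert (PySem.List.pyGetD words (↑k) "")
              ((PySem.List.pyGetD X (↑k) []).foldl (fun arr j => arr ++ [j]) [])))
    = (fun (st : List String × PySem.Dict String (List Int)) (i : Nat) =>
        if words.getD i "" ∈ st.1 then st
        else (st.1 ++ [words.getD i ""],
              st.2.insert (words.getD i "") (PySem.List.pyGetD X (i : Int) []))) := by
    funext st k
    rw [PySem.List.pyGetD_natCast, PySem.List.foldl_append_singleton, List.nil_append]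
  rw [hfun, pvA_loop X words words.length le_rfl]
  rfl

-- B's reverse-overwrite dict, as reached inside get_image_dict_alt
def pvBD (words : List String) : PySem.Dict String Int :=
  (List.range words.length).reverse.foldl
    (fun d i => d.insert (words.getD i "") (i : Int)) PySem.Dict.empty

-- lookup in B's dict after processing the first k indices (in reverse)
theorem pvB_loop (words : List String) : ∀ (k : Nat), k ≤ words.length →
    ∀ (d : PySem.Dict String Int) (w : String),
    ((List.range k).reverse.foldl (fun d i => d.insert (words.getD i "") (i : Int)) d).get? w
    = if w ∈ words.take k then some (words.idxOf w : Int) else d.get? w := by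
  intro k
  induction k with
  | zero => intro _ d w; simp
  | succ k ih =>
    intro hk d w
    have hk' : k ≤ words.length := Nat.le_of_succ_le hk
    have hklt : k < words.length := hk
    have hg : words.getD k "" = words[k] := List.getD_eq_getElem words "" hklt
    have htake : words.take (k + 1) = words.take k ++ [words[k]] := by
      rw [List.take_add_one, List.getElem?_eq_getElem hklt]; rfl
    rw [List.range_succ, List.reverse_append, List.reverse_singleton, List.singleton_append,
      List.foldl_cons, ih hk', htake]
    by_cases h1 : w ∈ words.take k
    · rw [if_pos h1, if_pos (List.mem_append_left _ h1)]
    · rw [if_neg h1]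
      by_cases h2 : w = words[k]
      · subst h2
        rw [← hg, PySem.Dict.get?_insert_self, hg]
        rw [if_pos (List.mem_append_right _ (List.mem_singleton.mpr rfl)),
          pv_idxOf_getElem words k hklt h1]
      · rw [PySem.Dict.get?_insert_of_ne _ _ (by rw [hg]; exact h2)]
        have hnm : w ∉ words.take k ++ [words[k]] := by
          simp only [List.mem_append, List.mem_singleton]
          rintro (h | h)
          · exact h1 h
          · exact h2 h
        rw [if_neg hnm]

-- lookup in B's full dict
theorem pvBD_get (words : List String) (w : String) :
    (pvBD words).get? w = if w ∈ words then some (words.idxOf w : Int) else none := by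
  rw [pvBD, pvB_loop words words.length le_rfl, List.take_length, PySem.Dict.get?_empty]

theorem pvBD_nodup (words : List String) : (pvBD words).keys.Nodup :=
  PySem.Dict.nodup_keys_foldl_insert_key _ (fun i => words.getD i "") (fun _ i => (i : Int)) _
    PySem.Dict.nodup_keys_empty

-- the first-occurrence pairs, in index order
def pvL' (words : List String) : List (String × Int) :=
  (pvFk words words.length).map (fun i => (words.getD i "", (i : Int)))

theorem pvL'_perm (words : List String) : (pvL' words).Perm (pvBD words).items := by
  have hnd := pvBD_nodup words
  have hitems : (pvBD words).items
      = (pvBD words).keys.map (fun k => (k, (pvBD words).getD k 0)) :=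
    PySem.Dict.items_eq_map_keys _ hnd 0
  have hkeys : ∀ w, w ∈ (pvBD words).keys ↔ w ∈ words := by
    intro w
    constructor
    · intro h
      by_contra hw
      have := (PySem.Dict.get?_eq_none_iff_not_mem_keys (pvBD words) w).mp
        (by rw [pvBD_get, if_neg hw])
      exact this h
    · intro hw
      by_contra h
      have := (PySem.Dict.get?_eq_none_iff_not_mem_keys (pvBD words) w).mpr h
      rw [pvBD_get, if_pos hw] at this
      exact Option.some_ne_none _ this
  have hFnd : (pvFk words words.length).Nodup :=
    (List.nodup_range (n := words.length)).filter _
  have hndL' : (pvL' words).Nodup :=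
    List.Nodup.map (fun a b h => Nat.cast_injective (congrArg Prod.snd h)) hFnd
  have hnditems : (pvBD words).items.Nodup := by
    rw [hitems]
    exact List.Nodup.map (fun a b h => congrArg Prod.fst h) hnd
  refine (List.perm_ext_iff_of_nodup hndL' hnditems).mpr ?_
  intro p
  rw [hitems]
  simp only [List.mem_map, pvL']
  constructor
  · rintro ⟨i, hi, rfl⟩
    rw [pvFk, List.mem_filter, List.mem_range, decide_eq_true_eq] at hi
    obtain ⟨hilen, hfirst⟩ := hi
    have hg : words.getD i "" = words[i] := List.getD_eq_getElem words "" hilen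
    refine ⟨words.getD i "", (hkeys _).mpr (by rw [hg]; exact List.getElem_mem hilen), ?_⟩
    rw [PySem.Dict.getD_eq_get?_getD, pvBD_get,
      if_pos (by rw [hg]; exact List.getElem_mem hilen)]
    rw [hg] at hfirst ⊢
    rw [pv_idxOf_getElem words i hilen hfirst]
    rfl
  · rintro ⟨w, hw, rfl⟩
    have hww : w ∈ words := (hkeys w).mp hw
    have hilen : words.idxOf w < words.length := List.idxOf_lt_length_of_mem hww
    refine ⟨words.idxOf w, ?_, ?_⟩
    · rw [pvFk, List.mem_filter, List.mem_range, decide_eq_true_eq]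
      refine ⟨hilen, ?_⟩
      rw [List.getD_eq_getElem words "" hilen, List.getElem_idxOf hilen]
      exact pv_not_mem_take_idxOf words w
    · rw [List.getD_eq_getElem words "" hilen, List.getElem_idxOf hilen,
        PySem.Dict.getD_eq_get?_getD, pvBD_get, if_pos hww]
      rfl

theorem pvL'_pairwise (words : List String) :
    (pvL' words).Pairwise (fun a b => a.2 < b.2) := by
  rw [pvL', List.pairwise_map]
  refine List.Pairwise.imp ?_ ((List.pairwise_lt_range (n := words.length)).filter _)
  intro a b h
  show (a : Int) < (b : Int)
  exact_mod_cast h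

-- B computes pvL
theorem pvB_eq (X : List (List Int)) (words : List String) :
    get_image_dict_alt X words = pvL X words := by
  unfold get_image_dict_alt
  rw [PySem.List.len_eq, PySem.List.pyRange_zero_nat, ← List.map_reverse, List.foldl_map]
  have hfun : (fun (d : PySem.Dict String Int) (k : Nat) =>
      d.insert (PySem.List.pyGetD words (↑k) "") (↑k))
    = (fun (d : PySem.Dict String Int) (i : Nat) => d.insert (words.getD i "") (i : Int)) := by
    funext d k
    rw [PySem.List.pyGetD_natCast]
  rw [hfun]
  show (PySem.List.sorted (pvBD words).items (fun p => p.2)).map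
      (fun p => (p.1, PySem.List.pyGetD X p.2 [])) = pvL X words
  rw [PySem.List.sorted_eq_of_perm_of_pairwise_lt (pvBD words).items (pvL' words) _
    (pvL'_perm words) (pvL'_pairwise words)]
  rw [pvL', pvL, List.map_map]
  rfl

-- ===== VERDICT (by name: the statement is the Claim_ definition above) =====
theorem get_image_dict_spec : Claim_equal_get_image_dict := by
  intro X words _ _
  unfold Spec_get_image_dict
  rw [pvA_eq, pvB_eq]
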